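-- pv_equiv track=rewrite | github.com/luzi82/HiSocial | core/hs_plugin/hs_plugin.py | _is_call_name
-- ===== SOURCE A (Python) =====
-- import string
--
-- def _is_call_name(v):
--     '''
--     Check if a str is valid package/func name.
--
--     @type v: str
--
--     @rtype:  boolean
--     @return: True iff str is valid package/func name
--     '''
--     r = string.ascii_letters + string.digits + "_"
--     if(v == None):return False
--     if(not isinstance(v, str)):return False
--     if(len(v) <= 0):return False
--     if(v[0] not in string.ascii_letters):return False
--     for c in v :
--         if(c not in r):return False
--     return True
-- ===== SOURCE B (Python) =====
-- import re
--
-- _NAME_RE = re.compile(r'[A-Za-z][A-Za-z0-9_]*')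
--
-- def _is_call_name(v):
--     '''
--     Check if a str is valid package/func name.
--
--     @type v: str
--
--     @rtype:  boolean
--     @return: True iff str is valid package/func name
--     '''
--     if v is None:
--         return False
--     if not isinstance(v, str):
--         return False
--     return _NAME_RE.fullmatch(v) is not None
-- ===== Notes on version B (the rewrite author's own statement) =====
-- stated objective: idiomatic
-- what changed: Replaced the hand-built alphabet string, the explicit first-character membership test and the per-character Python loop by a single compiled regex fullmatch of [A-Za-z][A-Za-z0-9_]*.
import Mathlib
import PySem

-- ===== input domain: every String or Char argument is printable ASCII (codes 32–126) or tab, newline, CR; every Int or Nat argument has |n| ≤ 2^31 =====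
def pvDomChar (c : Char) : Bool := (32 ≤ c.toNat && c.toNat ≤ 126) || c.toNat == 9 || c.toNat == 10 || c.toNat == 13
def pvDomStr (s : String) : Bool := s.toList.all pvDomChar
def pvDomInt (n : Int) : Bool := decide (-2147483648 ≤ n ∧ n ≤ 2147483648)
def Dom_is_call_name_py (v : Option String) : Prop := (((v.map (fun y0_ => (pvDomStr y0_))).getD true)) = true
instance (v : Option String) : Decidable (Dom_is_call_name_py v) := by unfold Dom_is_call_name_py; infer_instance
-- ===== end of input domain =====

-- B replaces A's per-character membership loop over a built alphabet string by a single
-- regex fullmatch of [A-Za-z][A-Za-z0-9_]* (ported as head/tail character-class range checks); objective: idiomatic.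

-- ===== PORT A =====
-- string.ascii_letters
def pvLettersA : List Char := "abcdefghijklmnopqrstuvwxyzABCDEFGHIJKLMNOPQRSTUVWXYZ".toList
-- r = string.ascii_letters + string.digits + "_"
def pvR_A : List Char := pvLettersA ++ "0123456789".toList ++ "_".toList

def is_call_name_py (v : Option String) : Bool :=
  match v with
  | none => false                    -- if v == None: return False  (isinstance guard is vacuous under the type)
  | some s =>
    let cs := s.toList
    if cs.length ≤ 0 then false      -- if len(v) <= 0: return False
    else match PySem.List.pyGet? cs 0 with   -- v[0]
      | none => false
      | some c0 =>
        if !(pvLettersA.contains c0) then false   -- if v[0] not in string.ascii_letters: return False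
        else cs.all (fun c => pvR_A.contains c)   -- for c in v: if c not in r: return False / return True

-- ===== PORT B =====
-- regex character class [A-Za-z]
def pvLead (c : Char) : Bool := ('A' ≤ c && c ≤ 'Z') || ('a' ≤ c && c ≤ 'z')
-- regex character class [A-Za-z0-9_]
def pvBody (c : Char) : Bool := pvLead c || ('0' ≤ c && c ≤ '9') || c == '_'

-- re.fullmatch(r'[A-Za-z][A-Za-z0-9_]*', v) is not None
def is_call_name_py_alt (v : Option String) : Bool :=
  match v with
  | none => false
  | some s =>
    match s.toList with
    | [] => false
    | c :: cs => pvLead c && cs.all pvBody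

-- ===== PRECONDITION & SPEC =====
def Spec_is_call_name_py (v : Option String) (out : Bool) : Prop := out = is_call_name_py_alt v
instance (v : Option String) (out : Bool) : Decidable (Spec_is_call_name_py v out) := by unfold Spec_is_call_name_py; infer_instance

-- ===== CLAIM (what is proved, stated in full; the proofs are below) =====
def Claim_equal_is_call_name_py : Prop := ∀ (v : Option String), Dom_is_call_name_py v → Spec_is_call_name_py v (is_call_name_py v)

-- ===== LEMMAS AND PROOFS =====

lemma pv_char_toNat_inj : Function.Injective Char.toNat := by
  intro a b h
  exact Char.ext (UInt32.toNat_inj.mp h)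

lemma pv_le_iff (a b : Char) : a ≤ b ↔ a.toNat ≤ b.toNat := by
  rw [Char.le_def, UInt32.le_iff_toNat_le]; exact Iff.rfl

-- membership in A's ascii_letters string coincides with B's [A-Za-z] class, for every Char
lemma pv_letters_eq (c : Char) : pvLettersA.contains c = pvLead c := by
  have hmap : pvLettersA.map Char.toNat =
      [97,98,99,100,101,102,103,104,105,106,107,108,109,110,111,112,113,114,115,116,117,118,119,120,121,122,
       65,66,67,68,69,70,71,72,73,74,75,76,77,78,79,80,81,82,83,84,85,86,87,88,89,90] := by rfl
  rw [Bool.eq_iff_iff, List.contains_iff_mem,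
    ← List.mem_map_of_injective pv_char_toNat_inj, hmap]
  simp only [pvLead, Bool.or_eq_true, Bool.and_eq_true, decide_eq_true_iff, pv_le_iff,
    List.mem_cons, List.not_mem_nil, or_false]
  have h1 : ('A' : Char).toNat = 65 := rfl
  have h2 : ('Z' : Char).toNat = 90 := rfl
  have h3 : ('a' : Char).toNat = 97 := rfl
  have h4 : ('z' : Char).toNat = 122 := rfl
  rw [h1, h2, h3, h4]
  omega

-- membership in A's alphabet r coincides with B's [A-Za-z0-9_] class, for every Char
lemma pv_r_eq (c : Char) : pvR_A.contains c = pvBody c := by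
  have hmap : pvR_A.map Char.toNat =
      [97,98,99,100,101,102,103,104,105,106,107,108,109,110,111,112,113,114,115,116,117,118,119,120,121,122,
       65,66,67,68,69,70,71,72,73,74,75,76,77,78,79,80,81,82,83,84,85,86,87,88,89,90,
       48,49,50,51,52,53,54,55,56,57,95] := by rfl
  rw [Bool.eq_iff_iff, List.contains_iff_mem,
    ← List.mem_map_of_injective pv_char_toNat_inj, hmap]
  simp only [pvBody, pvLead, Bool.or_eq_true, Bool.and_eq_true, decide_eq_true_iff, pv_le_iff,
    beq_iff_eq, List.mem_cons, List.not_mem_nil, or_false]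
  have h1 : ('A' : Char).toNat = 65 := rfl
  have h2 : ('Z' : Char).toNat = 90 := rfl
  have h3 : ('a' : Char).toNat = 97 := rfl
  have h4 : ('z' : Char).toNat = 122 := rfl
  have h5 : ('0' : Char).toNat = 48 := rfl
  have h6 : ('9' : Char).toNat = 57 := rfl
  have h7 : ∀ x : Char, x = '_' ↔ x.toNat = 95 := fun x =>
    ⟨fun h => h ▸ rfl, fun h => pv_char_toNat_inj h⟩
  rw [h1, h2, h3, h4, h5, h6, h7]
  omega

lemma pv_lead_body (c : Char) (h : pvLead c = true) : pvBody c = true := by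
  simp [pvBody, h]

-- ===== VERDICT (by name: the statement is the Claim_ definition above) =====
theorem is_call_name_py_spec : Claim_equal_is_call_name_py := by
  intro v _hdom
  unfold Spec_is_call_name_py
  match v with
  | none => rfl
  | some s =>
    unfold is_call_name_py is_call_name_py_alt
    match hcs : s.toList with
    | [] => simp [hcs]
    | c :: cs =>
      simp only [hcs]
      have hget : PySem.List.pyGet? (c :: cs) 0 = some c := by
        simp [PySem.List.pyGet?, PySem.List.pyIdx?]
      simp only [hget, List.length_cons]
      rw [if_neg (by omega)]
      by_cases hl : pvLead c = true
      · have hcl : pvLettersA.contains c = true := by rw [pv_letters_eq, hl]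
        have hbody : pvR_A.contains c = true := by rw [pv_r_eq]; exact pv_lead_body c hl
        simp only [hcl, Bool.not_true, Bool.false_eq_true, if_false, List.all_cons, hl,
          Bool.true_and, hbody]
        exact List.all_congr rfl (fun x => pv_r_eq x)
      · have hcl : pvLettersA.contains c = false := by
          rw [pv_letters_eq]; exact Bool.not_eq_true _ |>.mp hl
        rw [hcl, Bool.not_eq_true _ |>.mp hl]
        simp
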